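-- pv_equiv track=rewrite | github.com/jagabi/__kakao_codingtest__ | 2018_KAKAO_BLIND_RECRUITMENT/프렌즈4블록.py | turn
-- ===== SOURCE A (Python) =====
-- import copy
--
-- def check(arr, i, j):
--     if arr[i][j] == arr[i + 1][j] and arr[i][j] == arr[i][j + 1] and arr[i][j] == arr[i + 1][j + 1]:
--         return True
--
--     return False
--
-- def turn(arr):
--     tmp = copy.deepcopy(arr)
--     for i in range(len(arr) - 1):
--         for j in range(len(arr[0]) - 1):
--             if check(arr, i, j):
--                 tmp[i][j] = 0
--                 tmp[i + 1][j] = 0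
--                 tmp[i][j + 1] = 0
--                 tmp[i + 1][j + 1] = 0
--     arr = tmp
--
--     return arr
-- ===== SOURCE B (Python) =====
-- def turn(arr):
--     h = len(arr)
--     w = len(arr[0]) if arr else 0
--     # flags[k][l]: the 2x2 block whose top-left corner is (k, l) is uniform
--     flags = [[a[l] == a[l + 1] == b[l] == b[l + 1] for l in range(w - 1)]
--              for a, b in zip(arr, arr[1:])]
--
--     def flag(k, l):
--         return 0 <= k < h - 1 and 0 <= l < w - 1 and flags[k][l]
--
--     # a cell is zeroed iff it lies inside some uniform block, i.e. one of the
--     # (up to four) blocks whose top-left corner is a neighbour above/left of it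
--     return [[0 if flag(i - 1, j - 1) or flag(i - 1, j) or flag(i, j - 1) or flag(i, j) else v
--              for j, v in enumerate(row)]
--             for i, row in enumerate(arr)]
-- ===== Notes on version B (the rewrite author's own statement) =====
-- stated objective: alternative
-- what changed: Instead of deep-copying the grid and overwriting the four cells of every uniform 2x2 block (push-style marking with a check helper), B precomputes a boolean flag grid over adjacent row pairs (flags[k][l] = block at (k,l) is uniform) and rebuilds the output cell by cell, zeroing a cell iff one of the up-to-four blocks containing it is flagged (pull-style neighbourhood query); the input is never mutated.
-- outside the precondition, e.g. on turn([[1, 2], [3]]): A returns [[1, 2], [3]], B returns [[1, 2], [3]]; on turn([[1, 1], [2], [3]]): A returns [[1, 1], [2], [3]], B raises IndexError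
import Mathlib
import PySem

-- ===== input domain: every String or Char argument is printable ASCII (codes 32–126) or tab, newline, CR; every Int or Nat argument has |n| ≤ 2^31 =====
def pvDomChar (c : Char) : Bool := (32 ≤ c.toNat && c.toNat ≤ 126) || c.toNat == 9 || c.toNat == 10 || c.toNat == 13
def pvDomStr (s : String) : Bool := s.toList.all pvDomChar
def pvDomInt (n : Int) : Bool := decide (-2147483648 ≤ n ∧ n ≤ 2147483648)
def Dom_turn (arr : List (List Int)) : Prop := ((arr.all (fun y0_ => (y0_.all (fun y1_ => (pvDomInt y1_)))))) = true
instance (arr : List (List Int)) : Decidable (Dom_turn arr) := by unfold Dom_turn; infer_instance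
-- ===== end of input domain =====

-- B replaces A's deepcopy-then-mark-in-place (with its separate `check` helper) by the opposite
-- decomposition: precompute a boolean flag grid over adjacent row pairs (flags[k][l] = the 2x2
-- block with top-left corner (k,l) is uniform), then rebuild the output cell by cell, zeroing a
-- cell iff one of the up-to-four blocks containing it is flagged; neither program mutates its input.

-- ===== PORT A =====
-- arr[i][j] for the in-range indices the loops produce (exact under Pre_turn's rectangularity)
def pvGet2 (arr : List (List Int)) (i j : Nat) : Int := (arr.getD i []).getD j 0

def check (arr : List (List Int)) (i j : Nat) : Bool :=
  if pvGet2 arr i j == pvGet2 arr (i + 1) j && pvGet2 arr i j == pvGet2 arr i (j + 1)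
      && pvGet2 arr i j == pvGet2 arr (i + 1) (j + 1) then
    true
  else
    false

-- tmp[i][j] = 0 (in-range under Pre_turn; List.set is the functional write)
def pvSet2 (g : List (List Int)) (i j : Nat) : List (List Int) :=
  g.set i ((g.getD i []).set j 0)

def turn (arr : List (List Int)) : List (List Int) :=
  let tmp := arr   -- copy.deepcopy(arr): values, not aliases
  let tmp := (List.range (arr.length - 1)).foldl (fun tmp i =>
    (List.range ((arr.headD []).length - 1)).foldl (fun tmp j =>
      if check arr i j then
        pvSet2 (pvSet2 (pvSet2 (pvSet2 tmp i j) (i + 1) j) i (j + 1)) (i + 1) (j + 1)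
      else tmp) tmp) tmp
  tmp

-- ===== PORT B =====
-- flag(k, l) from Source B: the guarded lookup into the flag grid (toNat is guarded by 0 ≤ k / 0 ≤ l)
def pvFlag (h w : Nat) (flags : List (List Bool)) (k l : Int) : Bool :=
  decide (0 ≤ k) && decide (k < (h : Int) - 1) && decide (0 ≤ l) && decide (l < (w : Int) - 1)
    && ((flags.getD k.toNat []).getD l.toNat false)

def turn_alt (arr : List (List Int)) : List (List Int) :=
  let h := arr.length
  let w := (arr.headD []).length   -- len(arr[0]) if arr else 0
  -- zip(arr, arr[1:]); a[l] etc. via getD, exact on Pre_turn's rectangular grids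
  let flags := (arr.zip (arr.drop 1)).map (fun p =>
    (List.range (w - 1)).map (fun l =>
      p.1.getD l 0 == p.1.getD (l + 1) 0 && p.1.getD (l + 1) 0 == p.2.getD l 0
        && p.2.getD l 0 == p.2.getD (l + 1) 0))
  (PySem.List.enumerate arr).map (fun p =>
    (PySem.List.enumerate p.2).map (fun q =>
      if pvFlag h w flags (p.1 - 1) (q.1 - 1) || pvFlag h w flags (p.1 - 1) q.1
          || pvFlag h w flags p.1 (q.1 - 1) || pvFlag h w flags p.1 q.1 then 0 else q.2))

-- ===== PRECONDITION & SPEC =====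
-- When the loops actually run (≥ 2 rows and first row of length ≥ 2), Pre_turn requires every row
-- to be at least as long as the first: on shorter rows Python A can raise IndexError inside
-- `check` (e.g. [[1,1],[1]]); the ragged grids where the short-circuiting comparisons happen
-- never to touch a missing cell (A returns, B returns the same value) are excluded with them.
def Pre_turn (arr : List (List Int)) : Prop :=
  arr.length ≤ 1 ∨ (arr.headD []).length ≤ 1 ∨
    ∀ row ∈ arr, (arr.headD []).length ≤ row.length
instance (arr : List (List Int)) : Decidable (Pre_turn arr) := by unfold Pre_turn; infer_instance

def pvWitness_turn : List (List Int) := [[1, 1, 2], [1, 1, 2], [3, 3, 3]]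

def Spec_turn (arr : List (List Int)) (out : List (List Int)) : Prop := out = turn_alt arr
instance (arr : List (List Int)) (out : List (List Int)) : Decidable (Spec_turn arr out) := by unfold Spec_turn; infer_instance

-- ===== CLAIM (what is proved, stated in full; the proofs are below) =====
def Claim_equal_turn : Prop := ∀ (arr : List (List Int)), Dom_turn arr → Pre_turn arr → Spec_turn arr (turn arr)

-- ===== LEMMAS AND PROOFS =====

-- The set of coordinates A's loops write to, as a fold mirroring A's loop structure
def pvZeros (arr : List (List Int)) : PySem.Set (Int × Int) :=
  (List.range (arr.length - 1)).foldl (fun z i =>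
    (List.range ((arr.headD []).length - 1)).foldl (fun z j =>
      if check arr i j then
        PySem.Set.update z [((i : Int), (j : Int)), ((i + 1 : Nat), (j : Int)),
                            ((i : Int), (j + 1 : Nat)), ((i + 1 : Nat), (j + 1 : Nat))]
      else z) z) PySem.Set.empty

-- applying a coordinate set to the grid (proof abstraction of B's rebuild)
def pvApplyZ (z : PySem.Set (Int × Int)) (arr : List (List Int)) : List (List Int) :=
  (PySem.List.enumerate arr).map (fun p =>
    (PySem.List.enumerate p.2).map (fun q =>
      if PySem.Set.contains z (p.1, q.1) then 0 else q.2))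

def pvRow (z : PySem.Set (Int × Int)) (r : Nat) (row : List Int) : List Int :=
  (PySem.List.enumerate row).map (fun q =>
    if PySem.Set.contains z ((r : Int), q.1) then 0 else q.2)

lemma applyZ_getElem? (z : PySem.Set (Int × Int)) (arr : List (List Int)) (r : Nat) :
    (pvApplyZ z arr)[r]? = arr[r]?.map (pvRow z r) := by
  simp only [pvApplyZ, List.getElem?_map, PySem.List.getElem?_enumerate, Option.map_map]
  cases arr[r]? <;> simp [pvRow]

lemma row_getElem? (z : PySem.Set (Int × Int)) (r : Nat) (row : List Int) (c : Nat) :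
    (pvRow z r row)[c]? = row[c]?.map (fun v =>
      if PySem.Set.contains z ((r : Int), (c : Int)) then 0 else v) := by
  simp only [pvRow, List.getElem?_map, PySem.List.getElem?_enumerate, Option.map_map]
  cases row[c]? <;> simp

lemma length_applyZ (z : PySem.Set (Int × Int)) (arr : List (List Int)) :
    (pvApplyZ z arr).length = arr.length := by
  simp [pvApplyZ, PySem.List.length_enumerate]

lemma applyZ_empty (arr : List (List Int)) : pvApplyZ PySem.Set.empty arr = arr := by
  simp [pvApplyZ, PySem.Set.empty, PySem.Set.contains, PySem.List.map_snd_enumerate]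

-- within the marked row, adding the coordinate = setting that cell to 0
lemma pvRow_add_self (z : PySem.Set (Int × Int)) (i j : Nat) (row : List Int) :
    pvRow (PySem.Set.add z ((i : Int), (j : Int))) i row = (pvRow z i row).set j 0 := by
  apply List.ext_getElem?
  intro c
  have hlen : (pvRow z i row).length = row.length := by
    simp [pvRow, PySem.List.length_enumerate]
  rw [row_getElem?, List.getElem?_set, hlen]
  by_cases hc : j = c
  · subst hc
    rcases Nat.lt_or_ge j row.length with h | h
    · simp [h]
    · simp [Nat.not_lt.mpr h]
  · rw [row_getElem?]
    simp only [if_neg hc]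
    have hcj : c ≠ j := fun h => hc h.symm
    simp [hcj]

-- a coordinate in another row does not change the rebuilt row
lemma pvRow_irrel (z : PySem.Set (Int × Int)) (i j r : Nat) (row : List Int) (h : r ≠ i) :
    pvRow (PySem.Set.add z ((i : Int), (j : Int))) r row = pvRow z r row := by
  simp [pvRow, h]

-- adding one coordinate to the set = one in-place write on the rebuilt grid
lemma applyZ_add (z : PySem.Set (Int × Int)) (arr : List (List Int)) (i j : Nat) :
    pvApplyZ (PySem.Set.add z ((i : Int), (j : Int))) arr = pvSet2 (pvApplyZ z arr) i j := by
  apply List.ext_getElem?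
  intro r
  rw [applyZ_getElem?]
  unfold pvSet2
  rw [List.getElem?_set, length_applyZ]
  by_cases hr : i = r
  · subst hr
    rcases Nat.lt_or_ge i arr.length with h | h
    · simp [h, pvRow_add_self, applyZ_getElem?]
    · simp [Nat.not_lt.mpr h]
  · rw [if_neg hr, applyZ_getElem?]
    cases harr : arr[r]? with
    | none => rfl
    | some row =>
      simp only [Option.map_some, Option.some.injEq]
      exact pvRow_irrel z i j r row (fun hri => hr hri.symm)

-- PART 1: A's in-place marking computes pvApplyZ of the collected coordinate set
theorem turn_eq_applyZ (arr : List (List Int)) : turn arr = pvApplyZ (pvZeros arr) arr := by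
  have hinner : ∀ (i : Nat) (z : PySem.Set (Int × Int)) (j : Nat),
      (if check arr i j then
        pvSet2 (pvSet2 (pvSet2 (pvSet2 (pvApplyZ z arr) i j) (i + 1) j) i (j + 1)) (i + 1) (j + 1)
      else pvApplyZ z arr)
      = pvApplyZ ((fun z j =>
          if check arr i j then
            PySem.Set.update z [((i : Int), (j : Int)), ((i + 1 : Nat), (j : Int)),
                                ((i : Int), (j + 1 : Nat)), ((i + 1 : Nat), (j + 1 : Nat))]
          else z) z j) arr := by
    intro i z j
    cases hC : check arr i j with
    | false => simp [hC]
    | true =>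
      simp only [hC, if_true]
      simp only [PySem.Set.update, List.foldl_cons, List.foldl_nil]
      rw [applyZ_add, applyZ_add, applyZ_add, applyZ_add]
  have hstep : ∀ (z : PySem.Set (Int × Int)) (i : Nat),
      (List.range ((arr.headD []).length - 1)).foldl (fun tmp j =>
        if check arr i j then
          pvSet2 (pvSet2 (pvSet2 (pvSet2 tmp i j) (i + 1) j) i (j + 1)) (i + 1) (j + 1)
        else tmp) (pvApplyZ z arr)
      = pvApplyZ ((List.range ((arr.headD []).length - 1)).foldl (fun z j =>
          if check arr i j then
            PySem.Set.update z [((i : Int), (j : Int)), ((i + 1 : Nat), (j : Int)),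
                                ((i : Int), (j + 1 : Nat)), ((i + 1 : Nat), (j + 1 : Nat))]
          else z) z) arr := by
    intro z i
    exact List.foldl_hom (f := fun z => pvApplyZ z arr)
      (g₂ := fun tmp j =>
        if check arr i j then
          pvSet2 (pvSet2 (pvSet2 (pvSet2 tmp i j) (i + 1) j) i (j + 1)) (i + 1) (j + 1)
        else tmp)
      (g₁ := fun z j =>
        if check arr i j then
          PySem.Set.update z [((i : Int), (j : Int)), ((i + 1 : Nat), (j : Int)),
                              ((i : Int), (j + 1 : Nat)), ((i + 1 : Nat), (j + 1 : Nat))]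
        else z)
      (hinner i)
  have hmain := List.foldl_hom (f := fun z => pvApplyZ z arr)
    (g₂ := fun tmp i =>
      (List.range ((arr.headD []).length - 1)).foldl (fun tmp j =>
        if check arr i j then
          pvSet2 (pvSet2 (pvSet2 (pvSet2 tmp i j) (i + 1) j) i (j + 1)) (i + 1) (j + 1)
        else tmp) tmp)
    (g₁ := fun z i =>
      (List.range ((arr.headD []).length - 1)).foldl (fun z j =>
        if check arr i j then
          PySem.Set.update z [((i : Int), (j : Int)), ((i + 1 : Nat), (j : Int)),
                              ((i : Int), (j + 1 : Nat)), ((i + 1 : Nat), (j + 1 : Nat))]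
        else z) z)
    (l := List.range (arr.length - 1)) (init := PySem.Set.empty) hstep
  show (List.range (arr.length - 1)).foldl (fun tmp i =>
      (List.range ((arr.headD []).length - 1)).foldl (fun tmp j =>
        if check arr i j then
          pvSet2 (pvSet2 (pvSet2 (pvSet2 tmp i j) (i + 1) j) i (j + 1)) (i + 1) (j + 1)
        else tmp) tmp) arr
    = pvApplyZ (pvZeros arr) arr
  unfold pvZeros
  beta_reduce at hmain
  rw [← hmain, applyZ_empty]

-- generic membership in a fold that conditionally updates a set
lemma mem_foldl_set {α β : Type} [BEq α] [LawfulBEq α]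
    (f : PySem.Set α → β → PySem.Set α) (P : β → α → Prop)
    (hf : ∀ z x p, p ∈ f z x ↔ p ∈ z ∨ P x p) :
    ∀ (l : List β) (z : PySem.Set α) (p : α),
      p ∈ l.foldl f z ↔ p ∈ z ∨ ∃ x ∈ l, P x p := by
  intro l
  induction l with
  | nil => intro z p; simp
  | cons x l ih =>
    intro z p
    rw [List.foldl_cons, ih, hf]
    simp only [List.mem_cons]
    constructor
    · rintro ((h | h) | ⟨y, hy, hP⟩)
      · exact Or.inl h
      · exact Or.inr ⟨x, Or.inl rfl, h⟩
      · exact Or.inr ⟨y, Or.inr hy, hP⟩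
    · rintro (h | ⟨y, (rfl | hy), hP⟩)
      · exact Or.inl (Or.inl h)
      · exact Or.inl (Or.inr hP)
      · exact Or.inr ⟨y, hy, hP⟩

-- characterisation of the collected coordinate set
lemma mem_pvZeros (arr : List (List Int)) (p : Int × Int) :
    p ∈ pvZeros arr ↔ ∃ i ∈ List.range (arr.length - 1),
      ∃ j ∈ List.range ((arr.headD []).length - 1), check arr i j = true ∧
        (p = ((i : Int), (j : Int)) ∨ p = ((i : Int) + 1, (j : Int)) ∨
         p = ((i : Int), (j : Int) + 1) ∨ p = ((i : Int) + 1, (j : Int) + 1)) := by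
  unfold pvZeros
  rw [mem_foldl_set _ (fun i p => ∃ j ∈ List.range ((arr.headD []).length - 1),
        check arr i j = true ∧
        (p = ((i : Int), (j : Int)) ∨ p = ((i : Int) + 1, (j : Int)) ∨
         p = ((i : Int), (j : Int) + 1) ∨ p = ((i : Int) + 1, (j : Int) + 1)))]
  · simp [PySem.Set.empty]
  · intro z i p
    rw [mem_foldl_set _ (fun j p => check arr i j = true ∧
        (p = ((i : Int), (j : Int)) ∨ p = ((i : Int) + 1, (j : Int)) ∨
         p = ((i : Int), (j : Int) + 1) ∨ p = ((i : Int) + 1, (j : Int) + 1)))]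
    intro z j p
    by_cases hC : check arr i j = true
    · simp only [hC, if_true, PySem.Set.mem_update, List.mem_cons]
      push_cast
      tauto
    · simp [hC]

-- Python's chained a[l] == a[l+1] == b[l] == b[l+1] equals A's check-condition
lemma chain_eq (x r b d : Int) :
    (x == r && r == b && b == d) = (x == b && x == r && x == d) := by
  rw [Bool.eq_iff_iff]
  simp only [Bool.and_eq_true, beq_iff_eq]
  constructor <;> rintro ⟨⟨h1, h2⟩, h3⟩ <;> refine ⟨⟨?_, ?_⟩, ?_⟩ <;> omega

lemma check_eq (arr : List (List Int)) (i j : Nat) :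
    check arr i j = (pvGet2 arr i j == pvGet2 arr (i + 1) j
      && pvGet2 arr i j == pvGet2 arr i (j + 1)
      && pvGet2 arr i j == pvGet2 arr (i + 1) (j + 1)) := by
  unfold check
  split <;> simp_all
  omega

-- the flag grid entry at (i, j) is A's check (both total via getD)
lemma flags_getD (arr : List (List Int)) (i j : Nat)
    (hi : i < arr.length - 1) (hj : j < (arr.headD []).length - 1) :
    ((((arr.zip (arr.drop 1)).map (fun p =>
        (List.range ((arr.headD []).length - 1)).map (fun l =>
          p.1.getD l 0 == p.1.getD (l + 1) 0 && p.1.getD (l + 1) 0 == p.2.getD l 0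
            && p.2.getD l 0 == p.2.getD (l + 1) 0))).getD i []).getD j false)
      = check arr i j := by
  have hiz : i < (arr.zip (arr.drop 1)).length := by
    rw [List.length_zip, List.length_drop]; omega
  have hi1 : i + 1 < arr.length := by omega
  have e1 : arr[i]'(by omega) = arr.getD i [] := (List.getD_eq_getElem arr [] (by omega)).symm
  have e2 : arr[1 + i]'(by omega) = arr.getD (i + 1) [] := by
    have h : 1 + i = i + 1 := by omega
    simp only [h]
    exact (List.getD_eq_getElem arr [] hi1).symm
  have hrow : ((arr.zip (arr.drop 1)).map (fun p =>
        (List.range ((arr.headD []).length - 1)).map (fun l =>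
          p.1.getD l 0 == p.1.getD (l + 1) 0 && p.1.getD (l + 1) 0 == p.2.getD l 0
            && p.2.getD l 0 == p.2.getD (l + 1) 0))).getD i []
      = (List.range ((arr.headD []).length - 1)).map (fun l =>
          (arr.getD i []).getD l 0 == (arr.getD i []).getD (l + 1) 0
            && (arr.getD i []).getD (l + 1) 0 == (arr.getD (i + 1) []).getD l 0
            && (arr.getD (i + 1) []).getD l 0 == (arr.getD (i + 1) []).getD (l + 1) 0) := by
    rw [List.getD_eq_getElem?_getD, List.getElem?_map, List.getElem?_eq_getElem hiz,
      List.getElem_zip]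
    simp only [Option.map_some, Option.getD_some, List.getElem_drop, e1, e2]
  rw [hrow, List.getD_eq_getElem?_getD, List.getElem?_map,
    List.getElem?_eq_getElem (by simpa using hj), List.getElem_range]
  simp only [Option.map_some, Option.getD_some]
  rw [check_eq]
  exact chain_eq _ _ _ _

-- the guarded flag lookup, as an existential over block corners
lemma flag_iff (arr : List (List Int)) (k l : Int) :
    pvFlag arr.length (arr.headD []).length
      ((arr.zip (arr.drop 1)).map (fun p =>
        (List.range ((arr.headD []).length - 1)).map (fun l =>
          p.1.getD l 0 == p.1.getD (l + 1) 0 && p.1.getD (l + 1) 0 == p.2.getD l 0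
            && p.2.getD l 0 == p.2.getD (l + 1) 0))) k l = true
    ↔ ∃ i j : Nat, i < arr.length - 1 ∧ j < (arr.headD []).length - 1 ∧
        check arr i j = true ∧ k = (i : Int) ∧ l = (j : Int) := by
  unfold pvFlag
  simp only [Bool.and_eq_true, decide_eq_true_eq]
  constructor
  · rintro ⟨⟨⟨⟨hk0, hk1⟩, hl0⟩, hl1⟩, hval⟩
    refine ⟨k.toNat, l.toNat, by omega, by omega, ?_, by omega, by omega⟩
    rw [← flags_getD arr k.toNat l.toNat (by omega) (by omega)]
    exact hval
  · rintro ⟨i, j, hi, hj, hC, rfl, rfl⟩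
    refine ⟨⟨⟨⟨by omega, by omega⟩, by omega⟩, by omega⟩, ?_⟩
    rw [Int.toNat_natCast, Int.toNat_natCast, flags_getD arr i j hi hj]
    exact hC

-- per-cell: B's four-flag test equals membership in A's coordinate set
lemma cell_eq (arr : List (List Int)) (r c : Nat) :
    PySem.Set.contains (pvZeros arr) ((r : Int), (c : Int))
    = (pvFlag arr.length (arr.headD []).length
        ((arr.zip (arr.drop 1)).map (fun p =>
          (List.range ((arr.headD []).length - 1)).map (fun l =>
            p.1.getD l 0 == p.1.getD (l + 1) 0 && p.1.getD (l + 1) 0 == p.2.getD l 0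
              && p.2.getD l 0 == p.2.getD (l + 1) 0))) ((r : Int) - 1) ((c : Int) - 1)
      || pvFlag arr.length (arr.headD []).length
        ((arr.zip (arr.drop 1)).map (fun p =>
          (List.range ((arr.headD []).length - 1)).map (fun l =>
            p.1.getD l 0 == p.1.getD (l + 1) 0 && p.1.getD (l + 1) 0 == p.2.getD l 0
              && p.2.getD l 0 == p.2.getD (l + 1) 0))) ((r : Int) - 1) (c : Int)
      || pvFlag arr.length (arr.headD []).length
        ((arr.zip (arr.drop 1)).map (fun p =>
          (List.range ((arr.headD []).length - 1)).map (fun l =>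
            p.1.getD l 0 == p.1.getD (l + 1) 0 && p.1.getD (l + 1) 0 == p.2.getD l 0
              && p.2.getD l 0 == p.2.getD (l + 1) 0))) (r : Int) ((c : Int) - 1)
      || pvFlag arr.length (arr.headD []).length
        ((arr.zip (arr.drop 1)).map (fun p =>
          (List.range ((arr.headD []).length - 1)).map (fun l =>
            p.1.getD l 0 == p.1.getD (l + 1) 0 && p.1.getD (l + 1) 0 == p.2.getD l 0
              && p.2.getD l 0 == p.2.getD (l + 1) 0))) (r : Int) (c : Int)) := by
  rw [Bool.eq_iff_iff]
  rw [PySem.Set.contains_iff, mem_pvZeros]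
  simp only [Bool.or_eq_true, flag_iff, List.mem_range]
  constructor
  · rintro ⟨i, hi, j, hj, hC, (hp | hp | hp | hp)⟩ <;>
      rw [Prod.mk.injEq] at hp <;> obtain ⟨h1, h2⟩ := hp
    · exact Or.inr ⟨i, j, hi, hj, hC, h1, h2⟩
    · exact Or.inl (Or.inl (Or.inr ⟨i, j, hi, hj, hC, by omega, h2⟩))
    · exact Or.inl (Or.inr ⟨i, j, hi, hj, hC, h1, by omega⟩)
    · exact Or.inl (Or.inl (Or.inl ⟨i, j, hi, hj, hC, by omega, by omega⟩))
  · rintro (((⟨i, j, hi, hj, hC, hk, hl⟩ | ⟨i, j, hi, hj, hC, hk, hl⟩) |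
        ⟨i, j, hi, hj, hC, hk, hl⟩) | ⟨i, j, hi, hj, hC, hk, hl⟩)
    · exact ⟨i, hi, j, hj, hC, Or.inr (Or.inr (Or.inr (by rw [Prod.mk.injEq]; exact ⟨by omega, by omega⟩)))⟩
    · exact ⟨i, hi, j, hj, hC, Or.inr (Or.inl (by rw [Prod.mk.injEq]; exact ⟨by omega, hl⟩))⟩
    · exact ⟨i, hi, j, hj, hC, Or.inr (Or.inr (Or.inl (by rw [Prod.mk.injEq]; exact ⟨hk, by omega⟩)))⟩
    · exact ⟨i, hi, j, hj, hC, Or.inl (by rw [Prod.mk.injEq]; exact ⟨hk, hl⟩)⟩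

-- PART 2: B's rebuild equals pvApplyZ of the collected coordinate set
theorem turn_alt_eq_applyZ (arr : List (List Int)) :
    turn_alt arr = pvApplyZ (pvZeros arr) arr := by
  unfold turn_alt pvApplyZ
  apply List.map_congr_left
  intro p hp
  rcases (PySem.List.mem_enumerate_iff _ _ _).1 hp with ⟨r, hr, rfl⟩
  apply List.map_congr_left
  intro q hq
  rcases (PySem.List.mem_enumerate_iff _ _ _).1 hq with ⟨c, hc, rfl⟩
  simp only [zero_add]
  rw [cell_eq arr r c]

-- ===== VERDICT (by name: the statement is the Claim_ definition above) =====
theorem turn_spec : Claim_equal_turn := by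
  intro arr _ _
  unfold Spec_turn
  rw [turn_eq_applyZ, turn_alt_eq_applyZ]
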